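-- pv_equiv track=rewrite | github.com/HaoLiu923/DynHyperRAG | hypergraphrag/data/academic_loader.py | _get_year_range
-- ===== SOURCE A (Python) =====
-- from typing import Dict, List, Optional, Tuple, Set
--
-- def _get_year_range(papers: List[Dict]) -> Dict:
--     """Get the range of publication years in the dataset.
--
--     Args:
--         papers: List of papers
--
--     Returns:
--         Dictionary with year range information
--     """
--     years = []
--     for paper in papers:
--         year_str = paper.get('publication_year', '')
--         if year_str and year_str.isdigit():
--             years.append(int(year_str))
--
--     if not years:
--         return {'min_year': None, 'max_year': None, 'span': 0}
--
--     return {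
--         'min_year': min(years),
--         'max_year': max(years),
--         'span': max(years) - min(years) + 1
--     }
-- ===== SOURCE B (Python) =====
-- def _get_year_range(papers):
--     """Single streaming pass: running min/max instead of collecting a list."""
--     min_year = None
--     max_year = None
--     for paper in papers:
--         year_str = paper.get('publication_year', '')
--         if year_str and year_str.isdigit():
--             y = int(year_str)
--             if min_year is None:
--                 min_year = y
--                 max_year = y
--             else:
--                 if y < min_year:
--                     min_year = y
--                 if y > max_year:
--                     max_year = y
--     if min_year is None:
--         return {'min_year': None, 'max_year': None, 'span': 0}
--     return {'min_year': min_year, 'max_year': max_year, 'span': max_year - min_year + 1}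
-- ===== Notes on version B (the rewrite author's own statement) =====
-- stated objective: simpler
-- what changed: Replaced collect-all-years-then-min/max/min/max with a single streaming pass keeping a running min and max (no intermediate list).
import Mathlib
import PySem

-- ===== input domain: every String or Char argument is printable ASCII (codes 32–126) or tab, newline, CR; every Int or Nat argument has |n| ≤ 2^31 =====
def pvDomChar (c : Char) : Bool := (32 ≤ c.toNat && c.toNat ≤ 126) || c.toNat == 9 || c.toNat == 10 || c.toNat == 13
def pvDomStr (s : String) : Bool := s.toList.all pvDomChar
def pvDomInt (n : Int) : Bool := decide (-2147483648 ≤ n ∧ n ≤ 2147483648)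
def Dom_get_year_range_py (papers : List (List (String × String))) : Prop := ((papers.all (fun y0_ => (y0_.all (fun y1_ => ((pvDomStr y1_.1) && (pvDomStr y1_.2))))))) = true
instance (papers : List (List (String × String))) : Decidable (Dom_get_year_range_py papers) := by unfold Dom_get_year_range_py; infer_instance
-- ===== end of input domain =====

-- B replaces "collect all years into a list, then min/max it four times" by a single
-- streaming pass with a running (min, max) pair — simpler, no intermediate list.

-- ===== PORT A =====
-- literal port of A: build the list `years`, then `min(years)`/`max(years)`
def get_year_range_py (papers : List (List (String × String))) : List (String × Option Int) :=
  let years : List Int := papers.foldl (fun years paper =>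
    let year_str := (PySem.Dict.mk paper).getD "publication_year" ""
    if year_str ≠ "" ∧ PySem.Str.strIsdigit year_str then
      years ++ [(PySem.Int.ofStr? year_str).getD 0]   -- guarded by isdigit, so ofStr? is `some`
    else years) []
  if years = [] then
    [("min_year", none), ("max_year", none), ("span", some 0)]
  else
    [("min_year", PySem.List.min? years (fun y => y)),
     ("max_year", PySem.List.max? years (fun y => y)),
     ("span", some ((PySem.List.max? years (fun y => y)).getD 0
                    - (PySem.List.min? years (fun y => y)).getD 0 + 1))]

-- ===== PORT B =====
-- literal port of Source B: one pass, running min/max in an Option (min, max) state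
def get_year_range_py_alt (papers : List (List (String × String))) : List (String × Option Int) :=
  let st : Option (Int × Int) := papers.foldl (fun st paper =>
    let year_str := (PySem.Dict.mk paper).getD "publication_year" ""
    if year_str ≠ "" ∧ PySem.Str.strIsdigit year_str then
      let y := (PySem.Int.ofStr? year_str).getD 0
      match st with
      | none => some (y, y)
      | some (mn, mx) => some (if y < mn then y else mn, if mx < y then y else mx)
    else st) none
  match st with
  | none => [("min_year", none), ("max_year", none), ("span", some 0)]
  | some (mn, mx) => [("min_year", some mn), ("max_year", some mx), ("span", some (mx - mn + 1))]

-- ===== PRECONDITION & SPEC =====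
def Spec_get_year_range_py (papers : List (List (String × String))) (out : List (String × Option Int)) : Prop := out = get_year_range_py_alt papers
instance (papers : List (List (String × String))) (out : List (String × Option Int)) : Decidable (Spec_get_year_range_py papers out) := by unfold Spec_get_year_range_py; infer_instance

-- ===== CLAIM (what is proved, stated in full; the proofs are below) =====
def Claim_equal_get_year_range_py : Prop := ∀ (papers : List (List (String × String))), Dom_get_year_range_py papers → Spec_get_year_range_py papers (get_year_range_py papers)

-- ===== LEMMAS AND PROOFS =====

-- B's per-year update, named for the proofs (the port spells it inline)
def pvStep (st : Option (Int × Int)) (y : Int) : Option (Int × Int) :=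
  match st with
  | none => some (y, y)
  | some (mn, mx) => some (if y < mn then y else mn, if mx < y then y else mx)

-- running the streaming update over a list of years computes (fold min, fold max)
lemma pvStep_foldl_some (t : List Int) : ∀ (mn mx : Int),
    t.foldl pvStep (some (mn, mx))
      = some (t.foldl (fun a y => if y < a then y else a) mn,
              t.foldl (fun a y => if a < y then y else a) mx) := by
  induction t with
  | nil => intro mn mx; rfl
  | cons y t ih => intro mn mx; simp only [List.foldl_cons, pvStep]; exact ih _ _

lemma foldl_if_min (t : List Int) (x : Int) :
    t.foldl (fun a y => if y < a then y else a) x = t.foldl min x := by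
  have : (fun (a y : Int) => if y < a then y else a) = min := by
    funext a y; simp [min_def]; split_ifs <;> omega
  rw [this]

lemma foldl_if_max (t : List Int) (x : Int) :
    t.foldl (fun a y => if a < y then y else a) x = t.foldl max x := by
  have : (fun (a y : Int) => if a < y then y else a) = max := by
    funext a y; simp [max_def]; split_ifs <;> omega
  rw [this]

-- B's fold over papers equals the streaming fold pvStep over A's collected years
lemma fold_rel (papers : List (List (String × String))) : ∀ (acc : List Int),
    papers.foldl (fun st paper =>
      let year_str := (PySem.Dict.mk paper).getD "publication_year" ""
      if year_str ≠ "" ∧ PySem.Str.strIsdigit year_str then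
        let y := (PySem.Int.ofStr? year_str).getD 0
        match st with
        | none => some (y, y)
        | some (mn, mx) => some (if y < mn then y else mn, if mx < y then y else mx)
      else st) (acc.foldl pvStep none)
    = (papers.foldl (fun years paper =>
        let year_str := (PySem.Dict.mk paper).getD "publication_year" ""
        if year_str ≠ "" ∧ PySem.Str.strIsdigit year_str then
          years ++ [(PySem.Int.ofStr? year_str).getD 0]
        else years) acc).foldl pvStep none := by
  induction papers with
  | nil => intro acc; rfl
  | cons paper rest ih =>
      intro acc
      simp only [List.foldl_cons]
      by_cases h : (PySem.Dict.mk paper).getD "publication_year" "" ≠ "" ∧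
          PySem.Str.strIsdigit ((PySem.Dict.mk paper).getD "publication_year" "")
      · simp only [if_pos h]
        have := ih (acc ++ [(PySem.Int.ofStr? ((PySem.Dict.mk paper).getD "publication_year" "")).getD 0])
        rw [← this, List.foldl_append]
        rfl
      · simp only [if_neg h]; exact ih acc

-- ===== VERDICT (by name: the statement is the Claim_ definition above) =====
theorem get_year_range_py_spec : Claim_equal_get_year_range_py := by
  intro papers _
  unfold Spec_get_year_range_py get_year_range_py get_year_range_py_alt
  rw [show (none : Option (Int × Int)) = ([] : List Int).foldl pvStep none from rfl,
      fold_rel papers []]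
  cases hy : papers.foldl (fun years paper =>
      let year_str := (PySem.Dict.mk paper).getD "publication_year" ""
      if year_str ≠ "" ∧ PySem.Str.strIsdigit year_str then
        years ++ [(PySem.Int.ofStr? year_str).getD 0]
      else years) [] with
  | nil => rfl
  | cons x t =>
      simp only [List.foldl_cons, show pvStep none x = some (x, x) from rfl,
        pvStep_foldl_some, foldl_if_min, foldl_if_max,
        PySem.List.min?_id_cons, PySem.List.max?_id_cons]
      simp
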